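-- pv_equiv track=rewrite | github.com/zsaralin/DOM-tree-data | HorizontalChildren.py | not_below_above
-- ===== SOURCE A (Python) =====
-- def not_below_above(child, children, dictBB) :
--     top_node = dictBB[child][0]
--     bottom_node = dictBB[child][1]
--     for other_child in children :
--         top_other = dictBB[other_child][0]
--         bottom_other = dictBB[other_child][1]
--         if top_node > bottom_other or bottom_node < top_other : return False
--     return True
-- ===== SOURCE B (Python) =====
-- def not_below_above(child, children, dictBB):
--     if not children:
--         return True
--     min_bottom = min(dictBB[o][1] for o in children)
--     max_top = max(dictBB[o][0] for o in children)
--     return dictBB[child][0] <= min_bottom and dictBB[child][1] >= max_top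
-- ===== Notes on version B (the rewrite author's own statement) =====
-- stated objective: simpler
-- what changed: B replaces A's elementwise short-circuit loop by two aggregates (min of bottoms, max of tops) and a single final comparison against the child's span.
-- outside the precondition, e.g. on not_below_above('a', ['b', 'c'], {'a': [5, 6], 'b': [0, 1]}): A returns False, B raises KeyError
import Mathlib
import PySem

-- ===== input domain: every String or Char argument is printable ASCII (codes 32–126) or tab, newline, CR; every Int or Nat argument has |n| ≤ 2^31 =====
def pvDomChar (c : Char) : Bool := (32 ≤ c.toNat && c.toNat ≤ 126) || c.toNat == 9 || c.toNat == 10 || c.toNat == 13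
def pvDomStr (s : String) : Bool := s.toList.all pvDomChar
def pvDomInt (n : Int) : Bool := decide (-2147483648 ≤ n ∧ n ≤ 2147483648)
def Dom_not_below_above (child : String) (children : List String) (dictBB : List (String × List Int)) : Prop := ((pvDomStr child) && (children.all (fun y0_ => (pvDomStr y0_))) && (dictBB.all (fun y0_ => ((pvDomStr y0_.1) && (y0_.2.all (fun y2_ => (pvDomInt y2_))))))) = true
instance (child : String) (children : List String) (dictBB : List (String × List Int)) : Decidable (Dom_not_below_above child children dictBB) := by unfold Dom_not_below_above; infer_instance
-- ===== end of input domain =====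

-- B replaces A's elementwise short-circuit loop by two aggregates (min bottom / max top)
-- and one final comparison; objective: simpler. Same O(n) cost.

-- shared transliteration of the Python expression dictBB[k][i] (defaults are
-- unreachable under Pre_, which guarantees every lookup and index succeeds)
def bbGet (dictBB : List (String × List Int)) (k : String) (i : Int) : Int :=
  (((PySem.Dict.mk dictBB).get? k).bind (fun l => PySem.List.pyGet? l i)).getD 0

-- ===== PORT A =====
def nbaLoop (top_node bottom_node : Int) (dictBB : List (String × List Int)) :
    List String → Bool
  | [] => true
  | other_child :: rest =>
    let top_other := bbGet dictBB other_child 0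
    let bottom_other := bbGet dictBB other_child 1
    if top_node > bottom_other ∨ bottom_node < top_other then false
    else nbaLoop top_node bottom_node dictBB rest

def not_below_above (child : String) (children : List String) (dictBB : List (String × List Int)) : Bool :=
  let top_node := bbGet dictBB child 0
  let bottom_node := bbGet dictBB child 1
  nbaLoop top_node bottom_node dictBB children

-- ===== PORT B =====
def not_below_above_alt (child : String) (children : List String) (dictBB : List (String × List Int)) : Bool :=
  match children with
  | [] => true
  | c :: rest =>
    let min_bottom := rest.foldl (fun m o => min m (bbGet dictBB o 1)) (bbGet dictBB c 1)
    let max_top := rest.foldl (fun m o => max m (bbGet dictBB o 0)) (bbGet dictBB c 0)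
    decide (bbGet dictBB child 0 ≤ min_bottom ∧ bbGet dictBB child 1 ≥ max_top)

-- ===== PRECONDITION & SPEC =====
-- Python A raises KeyError/IndexError when the child's entry — or, before the
-- loop's early False, some child's entry — is missing or shorter than 2.
-- Pre_ requires every entry used to exist with ≥ 2 elements; this also
-- excludes inputs where A returns an early False while a LATER child's entry
-- is missing/short — B's aggregate scan reads every child and raises there.
def entryOK (dictBB : List (String × List Int)) (k : String) : Bool :=
  match (PySem.Dict.mk dictBB).get? k with
  | some l => decide (2 ≤ l.length)
  | none => false

def Pre_not_below_above (child : String) (children : List String) (dictBB : List (String × List Int)) : Prop :=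
  entryOK dictBB child = true ∧ ∀ c ∈ children, entryOK dictBB c = true

instance (child : String) (children : List String) (dictBB : List (String × List Int)) : Decidable (Pre_not_below_above child children dictBB) := by unfold Pre_not_below_above; infer_instance

def pvWitness_not_below_above : String × List String × (List (String × List Int)) :=
  ("a", ["b", "c"], [("a", [0, 2]), ("b", [1, 3]), ("c", [2, 4])])

def Spec_not_below_above (child : String) (children : List String) (dictBB : List (String × List Int)) (out : Bool) : Prop := out = not_below_above_alt child children dictBB
instance (child : String) (children : List String) (dictBB : List (String × List Int)) (out : Bool) : Decidable (Spec_not_below_above child children dictBB out) := by unfold Spec_not_below_above; infer_instance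

-- ===== CLAIM (what is proved, stated in full; the proofs are below) =====
def Claim_equal_not_below_above : Prop := ∀ (child : String) (children : List String) (dictBB : List (String × List Int)), Dom_not_below_above child children dictBB → Pre_not_below_above child children dictBB → Spec_not_below_above child children dictBB (not_below_above child children dictBB)

-- ===== LEMMAS AND PROOFS =====

theorem nbaLoop_eq_decide (d : List (String × List Int)) (t b : Int) :
    ∀ l : List String,
      nbaLoop t b d l = decide (∀ o ∈ l, t ≤ bbGet d o 1 ∧ bbGet d o 0 ≤ b)
  | [] => by simp [nbaLoop]
  | o :: rest => by
    simp only [nbaLoop, nbaLoop_eq_decide d t b rest]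
    by_cases h : t > bbGet d o 1 ∨ b < bbGet d o 0
    · simp only [if_pos h]
      have hno : ¬ (∀ x ∈ o :: rest, t ≤ bbGet d x 1 ∧ bbGet d x 0 ≤ b) := by
        intro hall
        have := hall o (List.mem_cons_self)
        omega
      exact (decide_eq_false hno).symm
    · simp only [if_neg h]
      rw [not_or, not_lt, not_lt] at h
      have : (∀ x ∈ o :: rest, t ≤ bbGet d x 1 ∧ bbGet d x 0 ≤ b) ↔
          (∀ x ∈ rest, t ≤ bbGet d x 1 ∧ bbGet d x 0 ≤ b) := by
        constructor
        · intro hall x hx; exact hall x (List.mem_cons_of_mem _ hx)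
        · intro hall x hx
          rcases List.mem_cons.mp hx with rfl | hx
          · omega
          · exact hall x hx
      simp only [decide_eq_decide]
      exact this.symm

theorem le_foldl_min (d : List (String × List Int)) (t : Int) :
    ∀ (l : List String) (m : Int),
      t ≤ l.foldl (fun a o => min a (bbGet d o 1)) m ↔
        t ≤ m ∧ ∀ o ∈ l, t ≤ bbGet d o 1
  | [], m => by simp
  | o :: rest, m => by
    simp only [List.foldl_cons, le_foldl_min d t rest]
    constructor
    · rintro ⟨h1, h2⟩
      refine ⟨?_, ?_⟩
      · exact le_trans h1 (min_le_left _ _)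
      · intro x hx
        rcases List.mem_cons.mp hx with rfl | hx
        · exact le_trans h1 (min_le_right _ _)
        · exact h2 x hx
    · rintro ⟨h1, h2⟩
      refine ⟨le_min h1 (h2 o List.mem_cons_self), fun x hx => h2 x (List.mem_cons_of_mem _ hx)⟩

theorem foldl_max_le (d : List (String × List Int)) (b : Int) :
    ∀ (l : List String) (m : Int),
      l.foldl (fun a o => max a (bbGet d o 0)) m ≤ b ↔
        m ≤ b ∧ ∀ o ∈ l, bbGet d o 0 ≤ b
  | [], m => by simp
  | o :: rest, m => by
    simp only [List.foldl_cons, foldl_max_le d b rest]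
    constructor
    · rintro ⟨h1, h2⟩
      refine ⟨le_trans (le_max_left _ _) h1, ?_⟩
      intro x hx
      rcases List.mem_cons.mp hx with rfl | hx
      · exact le_trans (le_max_right _ _) h1
      · exact h2 x hx
    · rintro ⟨h1, h2⟩
      exact ⟨max_le h1 (h2 o List.mem_cons_self), fun x hx => h2 x (List.mem_cons_of_mem _ hx)⟩

-- ===== VERDICT (by name: the statement is the Claim_ definition above) =====
theorem not_below_above_spec : Claim_equal_not_below_above := by
  intro child children dictBB _hdom _hpre
  unfold Spec_not_below_above not_below_above not_below_above_alt
  cases children with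
  | nil => simp [nbaLoop]
  | cons c rest =>
    simp only [nbaLoop_eq_decide]
    have hmin := le_foldl_min dictBB (bbGet dictBB child 0) rest (bbGet dictBB c 1)
    have hmax := foldl_max_le dictBB (bbGet dictBB child 1) rest (bbGet dictBB c 0)
    simp only [ge_iff_le]
    congr 1
    rw [eq_iff_iff]
    constructor
    · intro hall
      refine ⟨hmin.mpr ⟨(hall c List.mem_cons_self).1, fun o ho => (hall o (List.mem_cons_of_mem _ ho)).1⟩,
              hmax.mpr ⟨(hall c List.mem_cons_self).2, fun o ho => (hall o (List.mem_cons_of_mem _ ho)).2⟩⟩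
    · rintro ⟨h1, h2⟩
      obtain ⟨h1a, h1b⟩ := hmin.mp h1
      obtain ⟨h2a, h2b⟩ := hmax.mp h2
      intro o ho
      rcases List.mem_cons.mp ho with rfl | ho
      · exact ⟨h1a, h2a⟩
      · exact ⟨h1b o ho, h2b o ho⟩
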